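-- pv_equiv track=rewrite | github.com/charleyyen/aquarius | libs/split_array.py | split_list_by_value_1
-- ===== SOURCE A (Python) =====
-- def split_list_by_value_1(value, data_list, more_or_less=0):
--     if more_or_less < 0:
--         indices = [i for i, x in enumerate(data_list) if x <= value]
--     elif more_or_less > 0:
--         indices = [i for i, x in enumerate(data_list) if x >= value]
--     else: # more_or_less == 0:
--         indices = [i for i, x in enumerate(data_list) if x == value]
--
--     blocks = []
--     i = 0
--     for e in indices:
--         blocks.append(data_list[i:e])
--         i = e + 1
--
--     blocks.append(data_list[i:])
--     return blocks, indices
-- ===== SOURCE B (Python) =====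
-- def split_list_by_value_1(value, data_list, more_or_less=0):
--     if more_or_less < 0:
--         pred = lambda x: x <= value
--     elif more_or_less > 0:
--         pred = lambda x: x >= value
--     else:
--         pred = lambda x: x == value
--     blocks = []
--     indices = []
--     current = []
--     for i, x in enumerate(data_list):
--         if pred(x):
--             blocks.append(current)
--             indices.append(i)
--             current = []
--         else:
--             current.append(x)
--     blocks.append(current)
--     return blocks, indices
-- ===== Notes on version B (the rewrite author's own statement) =====
-- stated objective: alternative
-- what changed: Single linear pass that picks the comparison predicate once and builds the blocks and indices incrementally, instead of first collecting all matching indices and then slicing the list between them.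
import Mathlib
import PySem

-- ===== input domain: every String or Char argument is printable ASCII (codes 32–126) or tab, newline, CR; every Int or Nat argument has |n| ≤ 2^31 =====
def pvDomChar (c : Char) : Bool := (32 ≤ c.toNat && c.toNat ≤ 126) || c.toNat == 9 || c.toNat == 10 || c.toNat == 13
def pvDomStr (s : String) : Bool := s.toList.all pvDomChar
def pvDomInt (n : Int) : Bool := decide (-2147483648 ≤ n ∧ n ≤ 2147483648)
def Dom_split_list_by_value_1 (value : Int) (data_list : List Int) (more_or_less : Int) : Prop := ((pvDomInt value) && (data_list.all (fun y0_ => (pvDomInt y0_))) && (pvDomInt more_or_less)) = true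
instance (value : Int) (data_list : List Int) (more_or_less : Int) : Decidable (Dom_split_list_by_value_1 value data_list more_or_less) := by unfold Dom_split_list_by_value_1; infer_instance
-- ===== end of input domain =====

-- B replaces A's collect-all-matching-indices-then-slice scheme by a single pass that
-- picks the comparison predicate once and grows the current block incrementally (alternative decomposition, same cost).

-- ===== PORT A =====
def split_list_by_value_1 (value : Int) (data_list : List Int) (more_or_less : Int) : List (List Int) × List Int :=
  let indices : List Int :=
    if more_or_less < 0 then
      (PySem.List.enumerate data_list).filterMap (fun q => if q.2 ≤ value then some q.1 else none)
    else if more_or_less > 0 then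
      (PySem.List.enumerate data_list).filterMap (fun q => if q.2 ≥ value then some q.1 else none)
    else
      (PySem.List.enumerate data_list).filterMap (fun q => if q.2 == value then some q.1 else none)
  let st := indices.foldl (fun (st : List (List Int) × Int) e =>
      (st.1 ++ [PySem.List.slice data_list (some st.2) (some e)], e + 1)) ([], 0)
  (st.1 ++ [PySem.List.slice data_list (some st.2) none], indices)

-- ===== PORT B =====
def split_list_by_value_1_alt (value : Int) (data_list : List Int) (more_or_less : Int) : List (List Int) × List Int :=
  let pred : Int → Bool :=
    if more_or_less < 0 then (fun x => decide (x ≤ value))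
    else if more_or_less > 0 then (fun x => decide (x ≥ value))
    else (fun x => x == value)
  let st := (PySem.List.enumerate data_list).foldl
    (fun (st : List (List Int) × List Int × List Int) q =>
      if pred q.2 then (st.1 ++ [st.2.2], st.2.1 ++ [q.1], ([] : List Int))
      else (st.1, st.2.1, st.2.2 ++ [q.2])) ([], [], [])
  (st.1 ++ [st.2.2], st.2.1)

-- ===== PRECONDITION & SPEC =====
def Spec_split_list_by_value_1 (value : Int) (data_list : List Int) (more_or_less : Int) (out : List (List Int) × List Int) : Prop := out = split_list_by_value_1_alt value data_list more_or_less
instance (value : Int) (data_list : List Int) (more_or_less : Int) (out : List (List Int) × List Int) : Decidable (Spec_split_list_by_value_1 value data_list more_or_less out) := by unfold Spec_split_list_by_value_1; infer_instance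

-- ===== CLAIM (what is proved, stated in full; the proofs are below) =====
def Claim_equal_split_list_by_value_1 : Prop := ∀ (value : Int) (data_list : List Int) (more_or_less : Int), Dom_split_list_by_value_1 value data_list more_or_less → Spec_split_list_by_value_1 value data_list more_or_less (split_list_by_value_1 value data_list more_or_less)

-- ===== LEMMAS AND PROOFS =====

-- reference split: blocks (headI/tail view keeps it total) and matching indices
def pvRef (p : Int → Bool) : List Int → List (List Int)
  | [] => [[]]
  | x :: xs => if p x then [] :: pvRef p xs
               else (x :: (pvRef p xs).headI) :: (pvRef p xs).tail

def pvRefIdx (p : Int → Bool) : List Int → Int → List Int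
  | [], _ => []
  | x :: xs, s => if p x then s :: pvRefIdx p xs (s + 1) else pvRefIdx p xs (s + 1)

lemma pvRef_eta (p : Int → Bool) (xs : List Int) :
    (pvRef p xs).headI :: (pvRef p xs).tail = pvRef p xs := by
  cases xs with
  | nil => simp [pvRef]
  | cons x xs => by_cases h : p x <;> simp [pvRef, h]

lemma pvIdx_filterMap (p : Int → Bool) (xs : List Int) (s : Int) :
    (PySem.List.enumerate xs s).filterMap (fun q => if p q.2 then some q.1 else none)
      = pvRefIdx p xs s := by
  induction xs generalizing s with
  | nil => simp [PySem.List.enumerate_nil, pvRefIdx]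
  | cons x xs ih =>
    by_cases h : p x <;> simp [PySem.List.enumerate_cons, pvRefIdx, h, ih]

lemma pvA_main (p : Int → Bool) (xs : List Int) :
    ∀ (pre cur : List Int) (bs : List (List Int)),
    (let d := pre ++ cur ++ xs
     let r := (pvRefIdx p xs ((pre.length : Int) + (cur.length : Int))).foldl
        (fun (st : List (List Int) × Int) e =>
          (st.1 ++ [PySem.List.slice d (some st.2) (some e)], e + 1)) (bs, (pre.length : Int))
     r.1 ++ [PySem.List.slice d (some r.2) none])
      = bs ++ (cur ++ (pvRef p xs).headI) :: (pvRef p xs).tail := by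
  induction xs with
  | nil =>
    intro pre cur bs
    simp [pvRefIdx, pvRef, PySem.List.slice_from_natCast]
  | cons x xs ih =>
    intro pre cur bs
    by_cases h : p x
    · have hidx : pvRefIdx p (x :: xs) ((pre.length : Int) + (cur.length : Int))
          = ((pre.length : Int) + (cur.length : Int))
            :: pvRefIdx p xs ((pre.length : Int) + (cur.length : Int) + 1) := by
        simp [pvRefIdx, h]
      rw [hidx]
      have hcast : (pre.length : Int) + (cur.length : Int) = (((pre ++ cur).length : Nat) : Int) := by
        push_cast [List.length_append]; ring
      have hslice : PySem.List.slice (pre ++ cur ++ x :: xs)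
          (some (pre.length : Int)) (some ((pre.length : Int) + (cur.length : Int))) = cur := by
        rw [hcast, PySem.List.slice_natCast]
        simp [List.length_append]
      have harr : pre ++ cur ++ [x] ++ xs = pre ++ cur ++ x :: xs := by
        simp [List.append_assoc]
      have hlen : ((pre ++ cur ++ [x]).length : Int)
          = (pre.length : Int) + (cur.length : Int) + 1 := by
        push_cast [List.length_append, List.length_cons, List.length_nil]; ring
      have := ih (pre ++ cur ++ [x]) [] (bs ++ [cur])
      simp only [List.append_nil, List.length_nil, Nat.cast_zero, add_zero] at this
      rw [harr, hlen] at this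
      simp only [List.foldl_cons, hslice]
      rw [this]
      simp [pvRef, h, pvRef_eta]
    · have hidx : pvRefIdx p (x :: xs) ((pre.length : Int) + (cur.length : Int))
          = pvRefIdx p xs ((pre.length : Int) + (cur.length : Int) + 1) := by
        simp [pvRefIdx, h]
      rw [hidx]
      have := ih pre (cur ++ [x]) bs
      have harr : pre ++ (cur ++ [x]) ++ xs = pre ++ cur ++ x :: xs := by
        simp [List.append_assoc]
      have hlen : (pre.length : Int) + ((cur ++ [x]).length : Int)
          = (pre.length : Int) + (cur.length : Int) + 1 := by
        push_cast [List.length_append, List.length_cons, List.length_nil]; ring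
      rw [harr, hlen] at this
      rw [this]
      simp [pvRef, h]

lemma pvB_main (p : Int → Bool) (xs : List Int) :
    ∀ (s : Int) (bs : List (List Int)) (is cur : List Int),
    (let r := (PySem.List.enumerate xs s).foldl
        (fun (st : List (List Int) × List Int × List Int) q =>
          if p q.2 then (st.1 ++ [st.2.2], st.2.1 ++ [q.1], ([] : List Int))
          else (st.1, st.2.1, st.2.2 ++ [q.2])) (bs, is, cur)
     (r.1 ++ [r.2.2], r.2.1))
      = (bs ++ (cur ++ (pvRef p xs).headI) :: (pvRef p xs).tail, is ++ pvRefIdx p xs s) := by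
  induction xs with
  | nil => intro s bs is cur; simp [PySem.List.enumerate_nil, pvRef, pvRefIdx]
  | cons x xs ih =>
    intro s bs is cur
    by_cases h : p x
    · simp only [PySem.List.enumerate_cons, List.foldl_cons, h, if_pos]
      rw [ih (s + 1) (bs ++ [cur]) (is ++ [s]) []]
      simp [pvRef, pvRefIdx, h, pvRef_eta]
    · simp only [PySem.List.enumerate_cons, List.foldl_cons, h, if_neg, Bool.false_eq_true,
        not_false_iff]
      rw [ih (s + 1) bs is (cur ++ [x])]
      simp [pvRef, pvRefIdx, h]

lemma pvA_eq_ref (p : Int → Bool) (xs : List Int) :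
    (let st := (pvRefIdx p xs 0).foldl (fun (st : List (List Int) × Int) e =>
        (st.1 ++ [PySem.List.slice xs (some st.2) (some e)], e + 1)) ([], 0)
     st.1 ++ [PySem.List.slice xs (some st.2) none])
      = pvRef p xs := by
  have := pvA_main p xs [] [] []
  simpa [pvRef_eta] using this

lemma pvB_eq_ref (p : Int → Bool) (xs : List Int) :
    (let st := (PySem.List.enumerate xs).foldl
        (fun (st : List (List Int) × List Int × List Int) q =>
          if p q.2 then (st.1 ++ [st.2.2], st.2.1 ++ [q.1], ([] : List Int))
          else (st.1, st.2.1, st.2.2 ++ [q.2])) ([], [], [])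
     (st.1 ++ [st.2.2], st.2.1))
      = (pvRef p xs, pvRefIdx p xs 0) := by
  have := pvB_main p xs 0 [] [] []
  simpa [pvRef_eta] using this

-- ===== VERDICT (by name: the statement is the Claim_ definition above) =====
theorem split_list_by_value_1_spec : Claim_equal_split_list_by_value_1 := by
  intro value data_list more_or_less _
  unfold Spec_split_list_by_value_1 split_list_by_value_1 split_list_by_value_1_alt
  by_cases h1 : more_or_less < 0
  · simp only [h1, if_pos]
    have hp : ((PySem.List.enumerate data_list).filterMap
        (fun q => if q.2 ≤ value then some q.1 else none))
        = pvRefIdx (fun x => decide (x ≤ value)) data_list 0 := by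
      rw [← pvIdx_filterMap (fun x => decide (x ≤ value)) data_list 0]
      simp
    rw [hp]
    rw [pvB_eq_ref (fun x => decide (x ≤ value)) data_list]
    exact Prod.ext (pvA_eq_ref _ data_list) rfl
  · by_cases h2 : more_or_less > 0
    · simp only [h1, h2, if_neg, if_pos, not_false_iff]
      have hp : ((PySem.List.enumerate data_list).filterMap
          (fun q => if q.2 ≥ value then some q.1 else none))
          = pvRefIdx (fun x => decide (x ≥ value)) data_list 0 := by
        rw [← pvIdx_filterMap (fun x => decide (x ≥ value)) data_list 0]
        simp
      rw [hp]
      rw [pvB_eq_ref (fun x => decide (x ≥ value)) data_list]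
      exact Prod.ext (pvA_eq_ref _ data_list) rfl
    · simp only [h1, h2, ite_false]
      have hp : ((PySem.List.enumerate data_list).filterMap
          (fun q => if q.2 == value then some q.1 else none))
          = pvRefIdx (fun x => x == value) data_list 0 := by
        rw [← pvIdx_filterMap (fun x => x == value) data_list 0]
      rw [hp]
      rw [pvB_eq_ref (fun x => x == value) data_list]
      exact Prod.ext (pvA_eq_ref _ data_list) rfl
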